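-- pv_equiv track=rewrite | github.com/IshanIslam12/RSA-Message-Exchange | ai265.py | bin_mul
-- ===== SOURCE A (Python) =====
-- import operator
--
-- def bin_mul(fst: int, snd: int, add=operator.add, mod=lambda x: x) -> int:
--     """The 'peasant' binary multiplication algorithm, with customizable add and
--     optional modulus operators."""
--     assert fst >= 0
--     result = 0
--     while fst > 0:
--         if fst & 1:
--             result = mod(add(result, snd))
--         fst = fst >> 1
--         snd = mod(snd << 1)
--     return result
-- ===== SOURCE B (Python) =====
-- import operator
--
-- def bin_mul(fst: int, snd: int, add=operator.add, mod=lambda x: x) -> int: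
--     """Left-to-right (Horner) binary multiplication: scan fst's bits from the
--     most significant down, doubling the accumulator via add and adding snd
--     where a bit is set; snd is never shifted."""
--     assert fst >= 0
--     result = 0
--     for i in reversed(range(fst.bit_length())):
--         result = mod(add(result, result))
--         if (fst >> i) & 1:
--             result = mod(add(result, snd))
--     return result
-- ===== Notes on version B (the rewrite author's own statement) =====
-- stated objective: alternative
-- what changed: A's right-to-left peasant loop (halve fst, shift-double snd, add the current double at each set low bit) is replaced by the left-to-right Horner binary scheme: scan fst's bits MSB-first, double the accumulator itself via add at every step and add the unchanged snd where a bit is set; snd is never shifted and fst is never destructively halved.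
import Mathlib
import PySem

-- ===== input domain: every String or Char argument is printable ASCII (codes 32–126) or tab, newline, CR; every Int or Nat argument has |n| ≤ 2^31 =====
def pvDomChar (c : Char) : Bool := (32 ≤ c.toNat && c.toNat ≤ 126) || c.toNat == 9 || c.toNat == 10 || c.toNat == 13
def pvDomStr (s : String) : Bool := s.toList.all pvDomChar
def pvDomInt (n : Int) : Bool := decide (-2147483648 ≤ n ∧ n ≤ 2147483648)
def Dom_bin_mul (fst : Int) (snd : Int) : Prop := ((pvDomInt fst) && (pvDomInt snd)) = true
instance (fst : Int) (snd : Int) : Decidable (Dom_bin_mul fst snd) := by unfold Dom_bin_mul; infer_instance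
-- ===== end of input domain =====

-- B replaces A's right-to-left peasant loop (halve fst, double snd) by the left-to-right
-- Horner binary scheme (double the accumulator, add snd at set bits, MSB-first); same cost, alternative algorithm.


-- ===== PORT A =====
-- the while loop of A; Python's `>>`, `<<`, `&` on ints are Lean's `>>>`, `<<<`, PySem.Int.band (exact)
def binMulLoop (fst : Int) (snd : Int) (result : Int) : Int :=
  if h : fst > 0 then
    binMulLoop (fst >>> (1 : Nat)) (snd <<< (1 : Nat))
      (if PySem.Int.band fst 1 ≠ 0 then result + snd else result)
  else result
termination_by fst.toNat
decreasing_by rw [Int.shiftRight_eq_div_pow]; omega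

def bin_mul (fst : Int) (snd : Int) : Int := binMulLoop fst snd 0

-- ===== PORT B =====
-- Source B's for loop over reversed(range(fst.bit_length())): MSB-first Horner pass
def bin_mul_alt (fst : Int) (snd : Int) : Int :=
  let n := PySem.Int.bitLength fst
  ((List.range n).reverse).foldl
    (fun r (i : Nat) =>
      let r' := r + r
      if PySem.Int.band (fst >>> i) 1 ≠ 0 then r' + snd else r') 0

-- ===== PRECONDITION & SPEC =====
-- Pre_: Python A raises AssertionError when fst < 0 (so does B)
def Pre_bin_mul (fst : Int) (snd : Int) : Prop := 0 ≤ fst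
instance (fst : Int) (snd : Int) : Decidable (Pre_bin_mul fst snd) := by unfold Pre_bin_mul; infer_instance
def pvWitness_bin_mul : Int × Int := (6, -7)

def Spec_bin_mul (fst : Int) (snd : Int) (out : Int) : Prop := out = bin_mul_alt fst snd
instance (fst : Int) (snd : Int) (out : Int) : Decidable (Spec_bin_mul fst snd out) := by unfold Spec_bin_mul; infer_instance

-- ===== CLAIM (what is proved, stated in full; the proofs are below) =====
def Claim_equal_bin_mul : Prop := ∀ (fst : Int) (snd : Int), Dom_bin_mul fst snd → Pre_bin_mul fst snd → Spec_bin_mul fst snd (bin_mul fst snd)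

-- ===== LEMMAS AND PROOFS =====

theorem binMulLoop_eq (f s r : Int) : 0 ≤ f → binMulLoop f s r = r + f * s := by
  induction f, s, r using binMulLoop.induct with
  | case1 f s r h ih =>
    intro hf
    unfold binMulLoop
    rw [dif_pos h]
    simp only [dite_eq_ite] at ih
    rw [ih (by rw [Int.shiftRight_eq_div_pow]; omega)]
    rw [Int.shiftRight_eq_div_pow, Int.shiftLeft_eq, PySem.Int.band_one,
      PySem.Int.mod_eq_emod_of_pos (by norm_num)]
    norm_num
    split_ifs with hb
    · obtain ⟨q, hq⟩ : ∃ q : Int, f = 2 * q + 1 := ⟨f / 2, by omega⟩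
      have hq2 : f / 2 = q := by omega
      rw [hq2]; subst hq; ring
    · obtain ⟨q, hq⟩ : ∃ q : Int, f = 2 * q := ⟨f / 2, by omega⟩
      have hq2 : f / 2 = q := by omega
      rw [hq2]; subst hq; ring
  | case2 f s r h =>
    intro hf
    have : f = 0 := by omega
    subst this
    unfold binMulLoop
    simp

theorem fold_horner (F : Nat) (snd : Int) : ∀ (m : Nat) (r : Int),
    ((List.range m).reverse).foldl
      (fun r (i : Nat) =>
        let r' := r + r
        if PySem.Int.band ((F : Int) >>> i) 1 ≠ 0 then r' + snd else r') r
      = r * 2 ^ m + ((F % 2 ^ m : Nat) : Int) * snd := by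
  intro m
  induction m with
  | zero => intro r; simp
  | succ m ih =>
    intro r
    rw [List.range_succ, List.reverse_append, List.reverse_singleton]
    simp only [List.singleton_append, List.foldl_cons]
    rw [ih]
    have hcast : ((F : Int) >>> m) = ((F >>> m : Nat) : Int) := by exact_mod_cast rfl
    simp only [hcast, PySem.Int.band_one, PySem.Int.mod_eq_emod_of_pos (show (0:Int) < 2 by norm_num)]
    have hshift : F >>> m = F / 2 ^ m := Nat.shiftRight_eq_div_pow F m
    have hmod : F % 2 ^ (m + 1) = F % 2 ^ m + 2 ^ m * (F / 2 ^ m % 2) := by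
      rw [pow_succ, Nat.mod_mul]
    by_cases hb : ((F >>> m : Nat) : Int) % 2 ≠ 0
    · rw [if_pos hb]
      have hb1 : F / 2 ^ m % 2 = 1 := by omega
      rw [hmod, hb1]
      push_cast
      ring
    · rw [if_neg hb]
      have hb0 : F / 2 ^ m % 2 = 0 := by omega
      rw [hmod, hb0]
      push_cast
      ring

theorem alt_eq (fst snd : Int) (h : 0 ≤ fst) : bin_mul_alt fst snd = fst * snd := by
  obtain ⟨F, rfl⟩ : ∃ F : Nat, fst = (F : Int) := ⟨fst.toNat, by omega⟩
  unfold bin_mul_alt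
  rw [fold_horner F snd (PySem.Int.bitLength (F : Int)) 0]
  have hlt : F < 2 ^ PySem.Int.bitLength (F : Int) := by
    have := PySem.Int.lt_two_pow_bitLength (F : Int)
    simpa using this
  rw [Nat.mod_eq_of_lt hlt]
  ring

-- ===== VERDICT (by name: the statement is the Claim_ definition above) =====
theorem bin_mul_spec : Claim_equal_bin_mul := by
  intro fst snd _ hpre
  unfold Spec_bin_mul bin_mul
  rw [binMulLoop_eq fst snd 0 hpre, alt_eq fst snd hpre, zero_add]
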